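-- pv_equiv track=rewrite | github.com/pmbasene/xml_log_officiel | RFJ_v1.0.py | Write_StgSource_File_StgCible
-- ===== SOURCE A (Python) =====
-- from pprint import pprint
--
-- def Write_StgSource_File_StgCible(LS, LC):
--     rows = []
--     for source in LS:
--         for cible in LC:
--             if source[1] == cible[0]:
--                 row = source[0]+','+source[1]+','+cible[1]+'\n'
--                 # row = tuple(row)
--                 rows.append(row)
--     pprint(rows)
--     return rows
-- ===== SOURCE B (Python) =====
-- def Write_StgSource_File_StgCible(LS, LC):
--     # hash-group LC by its key column, then one pass over LS
--     by_key = {}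
--     for cible in LC:
--         by_key[cible[0]] = by_key.get(cible[0], []) + [cible[1]]
--     rows = [source[0] + ',' + source[1] + ',' + c1 + '\n'
--             for source in LS
--             for c1 in by_key.get(source[1], [])]
--     return rows
-- ===== Notes on version B (the rewrite author's own statement) =====
-- stated objective: faster
-- what changed: Replaces the nested scan of LC for every source row by a dict grouping LC's values by key built once, then a single lookup per source row.
import Mathlib
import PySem

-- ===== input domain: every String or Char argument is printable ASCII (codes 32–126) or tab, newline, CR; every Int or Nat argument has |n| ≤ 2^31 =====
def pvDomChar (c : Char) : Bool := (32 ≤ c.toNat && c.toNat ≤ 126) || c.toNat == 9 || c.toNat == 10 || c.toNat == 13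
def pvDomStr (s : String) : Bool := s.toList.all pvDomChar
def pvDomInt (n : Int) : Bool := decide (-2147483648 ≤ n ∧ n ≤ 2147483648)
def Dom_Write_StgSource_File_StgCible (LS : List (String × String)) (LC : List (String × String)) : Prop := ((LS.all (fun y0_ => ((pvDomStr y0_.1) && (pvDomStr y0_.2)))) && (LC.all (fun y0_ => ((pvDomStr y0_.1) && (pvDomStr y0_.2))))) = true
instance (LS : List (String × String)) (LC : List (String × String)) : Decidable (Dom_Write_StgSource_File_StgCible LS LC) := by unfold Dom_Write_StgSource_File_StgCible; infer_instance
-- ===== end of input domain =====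

-- B replaces A's nested O(|LS|*|LC|) scan by a dict grouping LC's values by key (objective: faster);
-- equivalence is about the RETURN value only: A additionally pprints the rows to stdout, B does not.


-- ===== PORT A =====
-- A: nested loops, appending a row for each matching (source, cible) pair
def Write_StgSource_File_StgCible (LS : List (String × String)) (LC : List (String × String)) : List String :=
  LS.foldl (fun rows source =>
    LC.foldl (fun rows cible =>
      if source.2 == cible.1 then
        rows ++ [source.1 ++ "," ++ source.2 ++ "," ++ cible.2 ++ "\n"]
      else rows) rows) []

-- ===== PORT B =====
-- B: group LC's values by key into a dict once, then one lookup per source row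
def Write_StgSource_File_StgCible_alt (LS : List (String × String)) (LC : List (String × String)) : List String :=
  let by_key : PySem.Dict String (List String) :=
    LC.foldl (fun d cible => d.modify cible.1 [] (· ++ [cible.2])) PySem.Dict.empty
  LS.flatMap (fun source =>
    (by_key.getD source.2 []).map (fun c1 => source.1 ++ "," ++ source.2 ++ "," ++ c1 ++ "\n"))

-- ===== PRECONDITION & SPEC =====
def Spec_Write_StgSource_File_StgCible (LS : List (String × String)) (LC : List (String × String)) (out : List String) : Prop := out = Write_StgSource_File_StgCible_alt LS LC
instance (LS : List (String × String)) (LC : List (String × String)) (out : List String) : Decidable (Spec_Write_StgSource_File_StgCible LS LC out) := by unfold Spec_Write_StgSource_File_StgCible; infer_instance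

-- ===== CLAIM (what is proved, stated in full; the proofs are below) =====
def Claim_equal_Write_StgSource_File_StgCible : Prop := ∀ (LS : List (String × String)) (LC : List (String × String)), Dom_Write_StgSource_File_StgCible LS LC → Spec_Write_StgSource_File_StgCible LS LC (Write_StgSource_File_StgCible LS LC)

-- ===== LEMMAS AND PROOFS =====

-- ===== VERDICT (by name: the statement is the Claim_ definition above) =====
lemma pv_row_eq (LS LC : List (String × String)) :
    Write_StgSource_File_StgCible LS LC = Write_StgSource_File_StgCible_alt LS LC := by
  unfold Write_StgSource_File_StgCible Write_StgSource_File_StgCible_alt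
  simp only [PySem.List.foldl_append_if, PySem.Dict.getD_foldl_modify_append,
    PySem.Dict.getD_empty, List.nil_append, List.map_map]
  rw [PySem.List.foldl_append_eq_flatMap]
  simp only [List.nil_append]
  congr 1
  funext source
  congr 1
  apply List.filter_congr
  intro c _
  rw [Bool.eq_iff_iff, beq_iff_eq, beq_iff_eq]; exact eq_comm

-- ===== VERDICT (by name: the statement is the Claim_ definition above) =====
theorem Write_StgSource_File_StgCible_spec : Claim_equal_Write_StgSource_File_StgCible := by
  intro LS LC _
  exact pv_row_eq LS LC
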